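-- pv_equiv track=rewrite | github.com/pypi-data/pypi-mirror-122 | packages/auto-editor/auto_editor-21.40.1-py3-none-any.whl/auto_editor/render/opencv.py | _find_state
-- ===== SOURCE A (Python) =====
-- def _find_state(chunks, cframe):
--     low = 0
--     high = len(chunks) - 1
--
--     while low <= high:
--         mid = low + (high - low) // 2
--
--         if(cframe >= chunks[mid][0] and cframe < chunks[mid][1]):
--             return chunks[mid][2]
--         elif(cframe > chunks[mid][0]):
--             low = mid + 1
--         else:
--             high = mid - 1
--
--     # cframe not in chunks
--     return 0
-- ===== SOURCE B (Python) =====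
-- def _find_state(chunks, cframe):
--     # Binary search recast as recursion on sublists: probe the middle element
--     # and recurse on the left or right slice (same probe sequence as an
--     # index-based loop, but no low/high bookkeeping).
--     def rec(sub):
--         if not sub:
--             return 0
--         m = (len(sub) - 1) // 2
--         start, end, state = sub[m]
--         if start <= cframe < end:
--             return state
--         if cframe > start:
--             return rec(sub[m + 1:])
--         return rec(sub[:m])
--     return rec(chunks)
-- ===== Notes on version B (the rewrite author's own statement) =====
-- stated objective: alternative
-- what changed: The index-based while-loop binary search (low/high/mid bookkeeping) is recast as a recursion on list slices: probe the middle of the current sublist and recurse on sub[m+1:] or sub[:m], with the same probe sequence and the same 0 fallthrough on every input.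
import Mathlib
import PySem

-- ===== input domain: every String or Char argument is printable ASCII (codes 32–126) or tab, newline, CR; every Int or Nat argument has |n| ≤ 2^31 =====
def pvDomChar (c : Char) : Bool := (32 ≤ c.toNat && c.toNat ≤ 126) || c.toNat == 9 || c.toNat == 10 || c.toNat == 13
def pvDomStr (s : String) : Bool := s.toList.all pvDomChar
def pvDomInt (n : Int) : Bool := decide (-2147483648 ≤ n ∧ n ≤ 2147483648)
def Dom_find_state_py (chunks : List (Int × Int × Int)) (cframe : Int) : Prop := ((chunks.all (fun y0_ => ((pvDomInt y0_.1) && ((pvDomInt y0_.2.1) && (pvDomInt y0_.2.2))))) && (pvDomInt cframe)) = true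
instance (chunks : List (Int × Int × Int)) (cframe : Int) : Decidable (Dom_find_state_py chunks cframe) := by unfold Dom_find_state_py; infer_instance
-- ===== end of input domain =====

-- B recasts the index-based binary-search loop as recursion on list slices
-- (same probe sequence, no low/high bookkeeping); objective: alternative.

-- ===== PORT A =====
-- the while-loop of _find_state, state (low, high)
def findLoopA (chunks : List (Int × Int × Int)) (cframe low high : Int) : Int :=
  if _h : low ≤ high then
    let mid := low + PySem.Int.floordiv (high - low) 2
    match PySem.List.pyGet? chunks mid with
    | some (s, e, v) =>
      if cframe ≥ s ∧ cframe < e then v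
      else if cframe > s then findLoopA chunks cframe (mid + 1) high
      else findLoopA chunks cframe low (mid - 1)
    | none => 0   -- Python IndexError; unreachable from find_state_py's initial bounds
  else 0
termination_by (high + 1 - low).toNat
decreasing_by
  all_goals
    rw [PySem.Int.floordiv_eq_ediv_of_pos (by norm_num)]
    omega

def find_state_py (chunks : List (Int × Int × Int)) (cframe : Int) : Int :=
  findLoopA chunks cframe 0 ((chunks.length : Int) - 1)

-- ===== PORT B =====
-- rec(sub) from Source B
def findRecB (cframe : Int) (sub : List (Int × Int × Int)) : Int :=
  if _h : sub = [] then 0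
  else
    let m := PySem.Int.floordiv ((sub.length : Int) - 1) 2
    match PySem.List.pyGet? sub m with
    | some (s, e, v) =>
      if s ≤ cframe ∧ cframe < e then v
      else if cframe > s then findRecB cframe (PySem.List.slice sub (some (m + 1)) none)
      else findRecB cframe (PySem.List.slice sub none (some m))
    | none => 0   -- Python IndexError; unreachable: m is always in range
termination_by sub.length
decreasing_by
  · rw [PySem.List.slice_from sub (by
      rw [PySem.Int.floordiv_eq_ediv_of_pos (by norm_num)]
      have : sub.length ≠ 0 := fun h => _h (List.eq_nil_of_length_eq_zero h)
      omega)]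
    have : 0 ≤ PySem.Int.floordiv ((sub.length : Int) - 1) 2 := by
      rw [PySem.Int.floordiv_eq_ediv_of_pos (by norm_num)]
      have : sub.length ≠ 0 := fun h => _h (List.eq_nil_of_length_eq_zero h)
      omega
    simp only [List.length_drop]
    have : sub.length ≠ 0 := fun h => _h (List.eq_nil_of_length_eq_zero h)
    omega
  · rw [PySem.List.slice_to sub (by
      rw [PySem.Int.floordiv_eq_ediv_of_pos (by norm_num)]
      have : sub.length ≠ 0 := fun h => _h (List.eq_nil_of_length_eq_zero h)
      omega)]
    simp only [List.length_take]
    have hne : sub.length ≠ 0 := fun h => _h (List.eq_nil_of_length_eq_zero h)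
    have : PySem.Int.floordiv ((sub.length : Int) - 1) 2 < (sub.length : Int) := by
      rw [PySem.Int.floordiv_eq_ediv_of_pos (by norm_num)]; omega
    omega

def find_state_py_alt (chunks : List (Int × Int × Int)) (cframe : Int) : Int :=
  findRecB cframe chunks

-- ===== PRECONDITION & SPEC =====
def Spec_find_state_py (chunks : List (Int × Int × Int)) (cframe : Int) (out : Int) : Prop := out = find_state_py_alt chunks cframe
instance (chunks : List (Int × Int × Int)) (cframe : Int) (out : Int) : Decidable (Spec_find_state_py chunks cframe out) := by unfold Spec_find_state_py; infer_instance

-- ===== CLAIM (what is proved, stated in full; the proofs are below) =====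
def Claim_equal_find_state_py : Prop := ∀ (chunks : List (Int × Int × Int)) (cframe : Int), Dom_find_state_py chunks cframe → Spec_find_state_py chunks cframe (find_state_py chunks cframe)

-- ===== LEMMAS AND PROOFS =====

-- A's loop on window [low, high] computes B's recursion on the slice chunks[low : high+1]
theorem loop_eq_rec (chunks : List (Int × Int × Int)) (cframe : Int) :
    ∀ (n : Nat) (low high : Int), (high + 1 - low).toNat = n → 0 ≤ low → high < (chunks.length : Int) →
      findLoopA chunks cframe low high
        = findRecB cframe ((chunks.drop low.toNat).take (high + 1 - low).toNat) := by
  intro n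
  induction n using Nat.strong_induction_on with
  | _ n ih =>
    intro low high hn h0 h1
    by_cases hlh : low ≤ high
    · -- window nonempty
      set sub : List (Int × Int × Int) := (chunks.drop low.toNat).take (high + 1 - low).toNat with hsub
      have hlen : sub.length = (high + 1 - low).toNat := by
        simp only [hsub, List.length_take, List.length_drop]; omega
      have hsubne : sub ≠ [] := by
        intro h; rw [h] at hlen; simp at hlen; omega
      obtain ⟨d, hdef⟩ : ∃ d, PySem.Int.floordiv (high - low) 2 = d := ⟨_, rfl⟩
      have hdb : 0 ≤ d ∧ d ≤ high - low := by
        rw [← hdef, PySem.Int.floordiv_eq_ediv_of_pos (by norm_num)]; omega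
      obtain ⟨hd0, hd1⟩ := hdb
      have hm : PySem.Int.floordiv ((sub.length : Int) - 1) 2 = d := by
        rw [hlen, show (((high + 1 - low).toNat : Int) - 1) = high - low from by omega, hdef]
      have hget : PySem.List.pyGet? sub d = PySem.List.pyGet? chunks (low + d) := by
        rw [PySem.List.pyGet?_of_nonneg sub (by omega),
            PySem.List.pyGet?_of_nonneg chunks (by omega), hsub]
        rw [List.getElem?_take, List.getElem?_drop]
        have h2 : d.toNat < (high + 1 - low).toNat := by omega
        simp only [h2, if_pos]
        congr 1; omega
      rw [findLoopA, findRecB]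
      simp only [hlh, dif_pos, hsubne, dif_neg, not_false_iff]
      rw [hm, hdef, hget]
      cases hc : PySem.List.pyGet? chunks (low + d) with
      | none => rfl
      | some t =>
        obtain ⟨s, e, v⟩ := t
        dsimp only
        by_cases hin : s ≤ cframe ∧ cframe < e
        · rw [if_pos (show cframe ≥ s ∧ cframe < e from ⟨hin.1, hin.2⟩), if_pos hin]
        · rw [if_neg (show ¬(cframe ≥ s ∧ cframe < e) from fun h => hin ⟨h.1, h.2⟩),
              if_neg hin]
          by_cases hgt : cframe > s
          · -- go right: [mid+1, high] vs sub[m+1:]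
            rw [if_pos hgt, if_pos hgt]
            rw [ih ((high + 1 - (low + d + 1)).toNat) (by omega) (low + d + 1) high
                (by rfl) (by omega) h1]
            congr 1
            rw [PySem.List.slice_from sub (by omega), hsub, List.drop_take, List.drop_drop]
            congr 1
            · omega
            · congr 1
              omega
          · -- go left: [low, mid-1] vs sub[:m]
            rw [if_neg hgt, if_neg hgt]
            rw [ih ((low + d - 1 + 1 - low).toNat) (by omega) low (low + d - 1)
                (by rfl) h0 (by omega)]
            congr 1
            rw [PySem.List.slice_to sub (by omega), hsub, List.take_take]
            congr 1
            omega
    · -- empty window: both sides 0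
      have : (high + 1 - low).toNat = 0 := by omega
      rw [this]
      rw [findLoopA, findRecB]
      simp [hlh]

-- ===== VERDICT (by name: the statement is the Claim_ definition above) =====
theorem find_state_py_spec : Claim_equal_find_state_py := by
  intro chunks cframe _
  unfold Spec_find_state_py find_state_py find_state_py_alt
  rw [loop_eq_rec chunks cframe (((chunks.length : Int) - 1) + 1 - 0).toNat 0
      ((chunks.length : Int) - 1) rfl le_rfl (by omega)]
  congr 1
  simp
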